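-- pv_equiv track=rewrite | github.com/random-robbie/Flipper-SubGhz-RAW-to-ESP32-C-Array-Converter | sub_to_cpp_converter.py | convert_binraw_to_timings
-- ===== SOURCE A (Python) =====
-- def convert_binraw_to_timings(hex_data, te, bit_count=None):
--     """Convert BinRAW hex data to timing array using Time Element"""
--     # Convert hex strings to binary
--     binary_str = ''
--     for hex_byte in hex_data:
--         binary_str += format(int(hex_byte, 16), '08b')
--
--     # Use only the specified number of bits if bit_count is provided
--     if bit_count and bit_count < len(binary_str):
--         binary_str = binary_str[:bit_count]
--
--     # Convert binary to timings
--     # Each bit represents a period of TE microseconds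
--     # Positive values = signal high, negative = signal low
--     timings = []
--     if not binary_str:
--         return timings
--
--     current_state = int(binary_str[0])
--     count = 1
--
--     for i in range(1, len(binary_str)):
--         bit = int(binary_str[i])
--         if bit == current_state:
--             count += 1
--         else:
--             # Add timing for accumulated bits
--             timing_value = count * te
--             if current_state == 0:
--                 timing_value = -timing_value
--             timings.append(timing_value)
--
--             # Reset for new state
--             current_state = bit
--             count = 1
--
--     # Add final timing
--     timing_value = count * te
--     if current_state == 0:
--         timing_value = -timing_value
--     timings.append(timing_value)
--
--     return timings
-- ===== SOURCE B (Python) =====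
-- def convert_binraw_to_timings(hex_data, te, bit_count=None):
--     """Convert BinRAW hex data to timing array using Time Element"""
--     bits = ''.join(format(int(h, 16), '08b') for h in hex_data)
--     if bit_count and bit_count < len(bits):
--         bits = bits[:bit_count]
--     if not bits:
--         return []
--     # boundary positions where the bit value changes, then pairwise
--     # differences of the cut list give the run lengths; the sign comes
--     # from the parity of the run index, not from the bit values
--     cuts = [0] + [i for i in range(1, len(bits)) if bits[i] != bits[i - 1]] + [len(bits)]
--     first = 1 if bits[0] == '1' else -1
--     return [(b - a) * te * (first if k % 2 == 0 else -first)
--             for k, (a, b) in enumerate(zip(cuts, cuts[1:]))]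
-- ===== Notes on version B (the rewrite author's own statement) =====
-- stated objective: alternative
-- what changed: Replaces A's single-pass current_state/count state machine (with its trailing-flush branch) by a boundary-index method: collect the positions where the bit value changes, take pairwise differences of the cut list as the run lengths, and assign each timing's sign by run-index parity instead of a tracked state.
-- outside the precondition, e.g. on convert_binraw_to_timings(['0', '-f'], 100, 4): A returns [-400], B returns [-400]
import Mathlib
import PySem

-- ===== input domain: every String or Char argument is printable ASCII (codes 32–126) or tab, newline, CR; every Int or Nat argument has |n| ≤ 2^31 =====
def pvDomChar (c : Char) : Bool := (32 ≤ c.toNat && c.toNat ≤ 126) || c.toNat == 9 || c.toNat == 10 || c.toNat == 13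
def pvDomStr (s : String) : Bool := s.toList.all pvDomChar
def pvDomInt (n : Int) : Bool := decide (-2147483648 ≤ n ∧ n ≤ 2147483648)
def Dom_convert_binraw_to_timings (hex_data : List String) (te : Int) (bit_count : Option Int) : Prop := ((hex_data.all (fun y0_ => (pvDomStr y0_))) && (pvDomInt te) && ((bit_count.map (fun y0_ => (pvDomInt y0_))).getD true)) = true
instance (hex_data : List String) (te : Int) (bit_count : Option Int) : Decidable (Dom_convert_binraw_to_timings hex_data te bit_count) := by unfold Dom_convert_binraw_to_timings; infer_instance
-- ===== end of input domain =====

-- B replaces A's current_state/count state machine by a boundary-index method: it collects the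
-- positions where the bit value changes, takes pairwise differences of the cut list as run lengths,
-- and assigns each timing's sign by run-index parity; same O(n) cost, a different algorithm.


-- ===== PORT A =====
-- format(n, '08b'): zero-pad format(n,'b') to width 8; exact for 0 ≤ n (Pre_ guarantees nonnegative values)
def pvFormat8 (n : Int) : List Char :=
  let s := PySem.Int.toBinChars n
  List.replicate (8 - s.length) '0' ++ s

-- int(h, 16); Pre_ guarantees the parse succeeds, so the getD default is never used
def pvHexVal (h : String) : Int := (PySem.Int.ofStrBase? h 16).getD 0

-- binary_str[:bit_count] under Python's truthiness guard `if bit_count and bit_count < len(...)`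
def pvTrunc (bits : List Char) (bit_count : Option Int) : List Char :=
  match bit_count with
  | none => bits
  | some bc => if bc ≠ 0 ∧ bc < (bits.length : Int) then PySem.List.slice bits none (some bc) else bits

-- int(binary_str[i]); exact on single-character strings (Pre_ keeps them '0'/'1')
def pvCharInt (c : Char) : Int := (PySem.Int.ofChars? [c]).getD 0

-- A's accumulation step: timing_value = count*te, negated when the run was of zeros
def pvEmitA (te cur count : Int) : Int := if cur = 0 then -(count * te) else count * te

-- A's `for i in range(1, len(binary_str))` state machine plus the final flush
def pvLoopA (te : Int) : List Char → Int → Int → List Int → List Int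
  | [], cur, count, acc => acc ++ [pvEmitA te cur count]
  | b :: rest, cur, count, acc =>
      if pvCharInt b = cur then pvLoopA te rest cur (count + 1) acc
      else pvLoopA te rest (pvCharInt b) 1 (acc ++ [pvEmitA te cur count])

def convert_binraw_to_timings (hex_data : List String) (te : Int) (bit_count : Option Int) : List Int :=
  let binary_str : List Char := hex_data.foldl (fun s h => s ++ pvFormat8 (pvHexVal h)) []
  let binary_str := pvTrunc binary_str bit_count
  match binary_str with
  | [] => []
  | c :: rest => pvLoopA te rest (pvCharInt c) 1 []

-- ===== PORT B =====
def convert_binraw_to_timings_alt (hex_data : List String) (te : Int) (bit_count : Option Int) : List Int :=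
  let bits : List Char := (hex_data.map (fun h => pvFormat8 (pvHexVal h))).flatten
  let bits := pvTrunc bits bit_count
  if bits.isEmpty then []
  else
    -- cuts = [0] + [i for i in range(1, len(bits)) if bits[i] != bits[i-1]] + [len(bits)]
    let cuts : List Int :=
      (0 :: (PySem.List.pyRange 1 (bits.length : Int) 1).filter
          (fun i => !(PySem.List.pyGet? bits i == PySem.List.pyGet? bits (i - 1)))) ++
        [(bits.length : Int)]
    let first : Int := if PySem.List.pyGet? bits 0 == some '1' then 1 else -1
    (PySem.List.enumerate (cuts.zip (PySem.List.slice cuts (some 1) none))).map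
      (fun kp => (kp.2.2 - kp.2.1) * te * (if kp.1 % 2 == 0 then first else -first))

-- ===== PRECONDITION & SPEC =====
-- Pre_ excludes inputs where some hex byte is not parseable by int(h, 16) or parses negative: there A
-- raises ValueError (on int(h,16) or later on int('-')), except in the degenerate case where bit_count
-- truncates the binary string before the stray '-' sign, where A still returns (and B returns the same value).
def Pre_convert_binraw_to_timings (hex_data : List String) (te : Int) (bit_count : Option Int) : Prop :=
  ∀ h ∈ hex_data, 0 ≤ (PySem.Int.ofStrBase? h 16).getD (-1)
instance (hex_data : List String) (te : Int) (bit_count : Option Int) : Decidable (Pre_convert_binraw_to_timings hex_data te bit_count) := by unfold Pre_convert_binraw_to_timings; infer_instance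

def pvWitness_convert_binraw_to_timings : List String × Int × Option Int := (["ff", "00", "a3"], 100, some 20)

def Spec_convert_binraw_to_timings (hex_data : List String) (te : Int) (bit_count : Option Int) (out : List Int) : Prop := out = convert_binraw_to_timings_alt hex_data te bit_count
instance (hex_data : List String) (te : Int) (bit_count : Option Int) (out : List Int) : Decidable (Spec_convert_binraw_to_timings hex_data te bit_count out) := by unfold Spec_convert_binraw_to_timings; infer_instance

-- ===== CLAIM (what is proved, stated in full; the proofs are below) =====
def Claim_equal_convert_binraw_to_timings : Prop := ∀ (hex_data : List String) (te : Int) (bit_count : Option Int), Dom_convert_binraw_to_timings hex_data te bit_count → Pre_convert_binraw_to_timings hex_data te bit_count → Spec_convert_binraw_to_timings hex_data te bit_count (convert_binraw_to_timings hex_data te bit_count)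

-- ===== LEMMAS AND PROOFS =====

-- the run-length decomposition both proofs bridge through: (bit value, run length) per maximal run
def pvRuns : List Char → List (Char × Nat)
  | [] => []
  | c :: rest =>
      (c, (rest.takeWhile (· == c)).length + 1) :: pvRuns (rest.dropWhile (· == c))
  termination_by l => l.length
  decreasing_by
    have := List.length_dropWhile_le (· == c) rest
    simp; omega

def pvEmitB (te : Int) (p : Char × Nat) : Int :=
  if p.1 = '1' then (p.2 : Int) * te else -((p.2 : Int) * te)

def pvIsBit (c : Char) : Prop := c = '0' ∨ c = '1'

lemma toDigitsCore_bits (fuel : Nat) : ∀ (n : Nat) (ds : List Char),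
    (∀ c ∈ ds, pvIsBit c) → ∀ c ∈ Nat.toDigitsCore 2 fuel n ds, pvIsBit c := by
  induction fuel with
  | zero => intro n ds hds c hc; exact hds c hc
  | succ fuel ih =>
      intro n ds hds c hc
      have hd : pvIsBit (n % 2).digitChar := by
        rcases Nat.mod_two_eq_zero_or_one n with h | h <;> simp [pvIsBit, h, Nat.digitChar]
      have hds' : ∀ x ∈ (n % 2).digitChar :: ds, pvIsBit x := by
        intro x hx
        rcases List.mem_cons.mp hx with hx | hx
        exacts [hx ▸ hd, hds x hx]
      rw [Nat.toDigitsCore] at hc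
      by_cases h0 : n / 2 = 0
      · simp only [h0, reduceIte] at hc
        exact hds' c hc
      · simp only [if_neg h0] at hc
        exact ih (n / 2) _ hds' c hc

lemma format8_bits (n : Int) (hn : 0 ≤ n) : ∀ c ∈ pvFormat8 n, pvIsBit c := by
  intro c hc
  simp only [pvFormat8, PySem.Int.toBinChars, List.mem_append] at hc
  rcases hc with hc | hc
  · left; exact (List.eq_of_mem_replicate hc)
  · rw [if_neg (by omega)] at hc
    exact toDigitsCore_bits _ _ [] (by simp) c hc

lemma charInt_zero : pvCharInt '0' = 0 := by decide
lemma charInt_one : pvCharInt '1' = 1 := by decide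

lemma charInt_inj {b c : Char} (hb : pvIsBit b) (hc : pvIsBit c) :
    (pvCharInt b = pvCharInt c) ↔ b = c := by
  rcases hb with hb | hb <;> rcases hc with hc | hc <;> subst hb <;> subst hc <;> simp <;> decide

lemma emit_eq (te : Int) (c : Char) (hc : pvIsBit c) (n : Nat) :
    pvEmitA te (pvCharInt c) (n : Int) = pvEmitB te (c, n) := by
  rcases hc with hc | hc <;> subst hc <;>
    simp [pvEmitA, pvEmitB, charInt_zero, charInt_one]

-- A's state machine computes exactly the run-length grouping
lemma loopA_eq_runs (te : Int) : ∀ (rest : List Char) (c : Char) (count : Int) (k : Nat),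
    count = (k : Int) + 1 → ∀ (acc : List Int),
    (∀ x ∈ c :: rest, pvIsBit x) →
    pvLoopA te rest (pvCharInt c) count acc =
      acc ++ pvEmitB te (c, k + 1 + (rest.takeWhile (· == c)).length)
          :: (pvRuns (rest.dropWhile (· == c))).map (pvEmitB te) := by
  intro rest
  induction rest with
  | nil =>
      intro c count k hcount acc hb
      have hc := hb c (by simp)
      simp only [pvLoopA, List.takeWhile_nil, List.dropWhile_nil, List.length_nil, pvRuns,
        List.map_nil, Nat.add_zero]
      rw [hcount, show ((k : Int) + 1) = ((k + 1 : Nat) : Int) by push_cast; ring, emit_eq te c hc]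
  | cons b rest ih =>
      intro c count k hcount acc hb
      have hc : pvIsBit c := hb c (by simp)
      have hbb : pvIsBit b := hb b (by simp)
      have hrest : ∀ x ∈ b :: rest, pvIsBit x := fun x hx => hb x (List.mem_cons_of_mem _ hx)
      by_cases hbc : b = c
      · subst hbc
        simp only [pvLoopA]
        rw [if_true]
        rw [ih b (count + 1) (k + 1) (by omega) acc hrest]
        simp only [List.takeWhile_cons, beq_self_eq_true, if_true, List.dropWhile_cons,
          List.length_cons]
        have harith : k + 1 + 1 + (rest.takeWhile (· == b)).length =
            k + 1 + ((rest.takeWhile (· == b)).length + 1) := by omega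
        rw [harith]
      · have hne : ¬ (pvCharInt b = pvCharInt c) := fun h => hbc ((charInt_inj hbb hc).mp h)
        simp only [pvLoopA]
        rw [if_neg hne]
        rw [ih b 1 0 (by norm_num) (acc ++ [pvEmitA te (pvCharInt c) count]) hrest]
        have htw : (b :: rest).takeWhile (· == c) = [] := by
          simp [hbc]
        have hdw : (b :: rest).dropWhile (· == c) = b :: rest := by
          simp [hbc]
        rw [htw, hdw]
        simp only [pvRuns, List.map_cons, List.length_nil, Nat.add_zero, List.append_assoc,
          List.singleton_append]
        rw [hcount, show ((k : Int) + 1) = ((k + 1 : Nat) : Int) by push_cast; ring, emit_eq te c hc]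
        simp [Nat.add_comm]

lemma bits_eq (hex_data : List String) :
    hex_data.foldl (fun s h => s ++ pvFormat8 (pvHexVal h)) [] =
      (hex_data.map (fun h => pvFormat8 (pvHexVal h))).flatten := by
  rw [PySem.List.foldl_append_eq_flatMap]
  simp [List.flatMap_def]

lemma bits0_bits (hex_data : List String)
    (hpre : ∀ h ∈ hex_data, 0 ≤ (PySem.Int.ofStrBase? h 16).getD (-1)) :
    ∀ c ∈ (hex_data.map (fun h => pvFormat8 (pvHexVal h))).flatten, pvIsBit c := by
  intro c hc
  rcases List.mem_flatten.mp hc with ⟨l, hl, hcl⟩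
  rcases List.mem_map.mp hl with ⟨h, hh, rfl⟩
  have := hpre h hh
  have hnn : 0 ≤ pvHexVal h := by
    unfold pvHexVal
    cases hop : PySem.Int.ofStrBase? h 16 with
    | none => simp [hop] at this
    | some v => simp [hop] at this ⊢; exact this
  exact format8_bits _ hnn c hcl

lemma trunc_bits (bits : List Char) (bit_count : Option Int)
    (hb : ∀ c ∈ bits, pvIsBit c) : ∀ c ∈ pvTrunc bits bit_count, pvIsBit c := by
  intro c hc
  cases bit_count with
  | none => exact hb c hc
  | some bc =>
      simp only [pvTrunc] at hc
      split_ifs at hc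
      · exact hb c (PySem.List.mem_of_mem_slice _ _ _ hc)
      · exact hb c hc

-- A's core on an already-built bit string equals the run-length grouping
lemma main_eq (te : Int) : ∀ (bits : List Char), (∀ c ∈ bits, pvIsBit c) →
    (match bits with
     | [] => ([] : List Int)
     | c :: rest => pvLoopA te rest (pvCharInt c) 1 []) =
      (pvRuns bits).map (pvEmitB te) := by
  intro bits
  cases bits with
  | nil => intro _; simp [pvRuns]
  | cons c rest =>
      intro hb
      show pvLoopA te rest (pvCharInt c) 1 [] = _
      rw [loopA_eq_runs te rest c 1 0 (by norm_num) [] hb]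
      simp [pvRuns, Nat.add_comm]

-- ===== B-side bridge =====

-- interior cut positions, computed structurally over adjacent pairs
def pvBCuts : List Char → Int → List Int
  | a :: b :: r, i => if b = a then pvBCuts (b :: r) (i + 1) else i :: pvBCuts (b :: r) (i + 1)
  | _, _ => []

-- cumulative boundary list of a run list: [b, b+m1, b+m1+m2, …]
def pvCumul : List (Char × Nat) → Int → List Int
  | [], b => [b]
  | (_, m) :: r, b => b :: pvCumul r (b + (m : Int))

def pvSignVal (c : Char) : Int := if c = '1' then 1 else -1

lemma bcuts_small (bits : List Char) (h : bits.length ≤ 1) (i : Int) : pvBCuts bits i = [] := by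
  match bits with
  | [] => rfl
  | [_] => rfl
  | _ :: _ :: _ => simp at h

-- the filtered index range is the structural cut list
lemma filter_range_eq_bcuts (bits : List Char) : ∀ (j : Nat),
    (PySem.List.pyRange ((j : Int) + 1) (bits.length : Int) 1).filter
        (fun i => !(PySem.List.pyGet? bits i == PySem.List.pyGet? bits (i - 1))) =
      pvBCuts (bits.drop j) ((j : Int) + 1) := by
  intro j
  induction h : bits.length - j generalizing j with
  | zero =>
      have hj : bits.length ≤ j := by omega
      rw [PySem.List.pyRange_one_eq_nil (by exact_mod_cast Nat.le_succ_of_le hj)]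
      rw [List.drop_eq_nil_of_le hj, bcuts_small _ (by simp), List.filter_nil]
  | succ n ih =>
      have hj : j < bits.length := by omega
      by_cases hj1 : j + 1 < bits.length
      · rw [PySem.List.pyRange_one_cons (by exact_mod_cast hj1)]
        rw [List.filter_cons]
        have e1 : PySem.List.pyGet? bits ((j : Int) + 1) = some bits[j + 1] := by
          rw [show ((j : Int) + 1) = ((j + 1 : Nat) : Int) by push_cast; ring,
            PySem.List.pyGet?_natCast, List.getElem?_eq_getElem hj1]
        have e0 : PySem.List.pyGet? bits ((j : Int) + 1 - 1) = some bits[j] := by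
          rw [show ((j : Int) + 1 - 1) = ((j : Nat) : Int) by ring,
            PySem.List.pyGet?_natCast, List.getElem?_eq_getElem hj]
        simp only [e1, e0]
        rw [show ((j : Int) + 1 + 1) = ((j + 1 : Nat) : Int) + 1 by push_cast; ring,
          ih (j + 1) (by omega)]
        rw [List.drop_eq_getElem_cons hj, List.drop_eq_getElem_cons hj1]
        by_cases hbeq : bits[j + 1] = bits[j]
        · simp only [pvBCuts, if_pos hbeq, hbeq, Option.some.injEq, beq_self_eq_true,
            Bool.not_true, Bool.false_eq_true, if_false]
          rw [show ((j : Int) + 1 + 1) = ((j + 1 : Nat) : Int) + 1 by push_cast; ring]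
          simp
        · simp only [pvBCuts, if_neg hbeq, Option.some.injEq, beq_iff_eq, hbeq,
            decide_false, Bool.not_false, if_true]
          rw [show ((j : Int) + 1 + 1) = ((j + 1 : Nat) : Int) + 1 by push_cast; ring]
          simpa using hbeq
      · have hle : bits.length ≤ j + 1 := by omega
        rw [PySem.List.pyRange_one_eq_nil (by exact_mod_cast hle), List.filter_nil]
        rw [bcuts_small _ (by simp; omega)]

lemma bcuts_const (c : Char) : ∀ (t : List Char) (s : Int), (∀ x ∈ t, x = c) →
    pvBCuts (c :: t) s = [] := by
  intro t
  induction t with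
  | nil => intro s _; rfl
  | cons x t ih =>
      intro s hall
      have hx : x = c := hall x (by simp)
      subst hx
      show (if x = x then pvBCuts (x :: t) (s + 1) else _) = []
      rw [if_pos rfl]
      exact ih (s + 1) (fun y hy => hall y (by simp [hy]))

lemma bcuts_run (c : Char) : ∀ (t : List Char) (e : Char) (r : List Char) (s : Int),
    e ≠ c → (∀ x ∈ t, x = c) →
    pvBCuts (c :: (t ++ e :: r)) s =
      (s + (t.length : Int)) :: pvBCuts (e :: r) (s + (t.length : Int) + 1) := by
  intro t
  induction t with
  | nil =>
      intro e r s hne _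
      show (if e = c then _ else s :: pvBCuts (e :: r) (s + 1)) = _
      rw [if_neg hne]
      simp
  | cons x t ih =>
      intro e r s hne hall
      have hx : x = c := hall x (by simp)
      subst hx
      show (if x = x then pvBCuts (x :: (t ++ e :: r)) (s + 1) else _) = _
      rw [if_pos rfl, ih e r (s + 1) hne (fun y hy => hall y (by simp [hy]))]
      simp only [List.length_cons]
      push_cast
      rw [show s + 1 + (t.length : Int) = s + ((t.length : Int) + 1) by ring]

-- the full cut list is the cumulative boundary list of the runs
lemma cuts_eq_cumul : ∀ (n : Nat) (bits : List Char), bits.length = n → bits ≠ [] → ∀ (b : Int),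
    b :: pvBCuts bits (b + 1) ++ [b + (bits.length : Int)] = pvCumul (pvRuns bits) b := by
  intro n
  induction n using Nat.strong_induction_on with
  | _ n ih =>
      intro bits hlen hne b
      match bits, hne with
      | c :: rest, _ =>
        have hruns : pvRuns (c :: rest) =
            (c, (rest.takeWhile (· == c)).length + 1) :: pvRuns (rest.dropWhile (· == c)) := by
          rw [pvRuns]
        set t := rest.takeWhile (· == c) with ht
        set d := rest.dropWhile (· == c) with hdq
        have hall : ∀ x ∈ t, x = c := fun x hx => by simpa using List.mem_takeWhile_imp hx
        have hsplit : t ++ d = rest := List.takeWhile_append_dropWhile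
        cases hd : d with
        | nil =>
            have hall' : ∀ x ∈ rest, x = c := by
              intro x hx
              rw [← hsplit, hd, List.append_nil] at hx
              exact hall x hx
            have hl : t.length = rest.length := by
              have := congrArg List.length hsplit
              rw [hd] at this
              simpa using this
            rw [hruns, hd, bcuts_const c rest (b + 1) hall']
            simp [pvRuns, pvCumul, hl]
        | cons e r =>
            have hec : e ≠ c := by
              have h2 := List.head?_dropWhile_not (· == c) rest
              rw [← hdq, hd] at h2
              simpa using h2
            have hlr : rest.length = t.length + (e :: r).length := by
              have := congrArg List.length hsplit
              rw [hd] at this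
              simp at this
              simp
              omega
            have hlen2 : (e :: r).length < n := by
              simp only [List.length_cons] at hlen
              omega
            have hIH := ih (e :: r).length hlen2 (e :: r) rfl (by simp)
                (b + ((t.length + 1 : Nat) : Int))
            have hbc : pvBCuts (c :: rest) (b + 1) =
                (b + 1 + (t.length : Int)) ::
                  pvBCuts (e :: r) (b + 1 + (t.length : Int) + 1) := by
              conv_lhs => rw [← hsplit, hd]
              exact bcuts_run c t e r (b + 1) hec hall
            rw [hruns, hd, pvCumul]
            congr 1
            rw [hbc, ← hIH, List.cons_append]
            have a1 : b + 1 + (t.length : Int) = b + ((t.length + 1 : Nat) : Int) := by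
              push_cast; ring
            have a2 : b + ((c :: rest).length : Int) =
                b + ((t.length + 1 : Nat) : Int) + ((e :: r).length : Int) := by
              simp only [List.length_cons]
              rw [hlr]
              simp only [List.length_cons]
              push_cast
              ring
            rw [a1, a2]

lemma cumul_shape (r : List (Char × Nat)) (b : Int) :
    pvCumul r b = b :: (pvCumul r b).tail := by
  cases r with
  | nil => rfl
  | cons p r => cases p; rfl

-- the enumerated pairwise-difference map over the cumulative list is the signed run map
lemma enum_zip_cumul (te first : Int) : ∀ (n : Nat) (bits : List Char), bits.length = n →
    (∀ c ∈ bits, pvIsBit c) → ∀ (k b : Int),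
    (∀ c ∈ bits.head?, (if k % 2 == 0 then first else -first) = pvSignVal c) →
    (PySem.List.enumerate ((pvCumul (pvRuns bits) b).zip (pvCumul (pvRuns bits) b).tail) k).map
        (fun kp => (kp.2.2 - kp.2.1) * te * (if kp.1 % 2 == 0 then first else -first)) =
      (pvRuns bits).map (pvEmitB te) := by
  intro n
  induction n using Nat.strong_induction_on with
  | _ n ih =>
      intro bits hlen hb k b hsign
      match bits with
      | [] => simp [pvRuns, pvCumul, PySem.List.enumerate_nil]
      | c :: rest =>
        have hc : pvIsBit c := hb c (by simp)
        rw [pvRuns]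
        set t := rest.takeWhile (· == c) with ht
        set d := rest.dropWhile (· == c) with hdq
        rw [pvCumul]
        set m : Int := ((t.length + 1 : Nat) : Int) with hm
        set L : List Int := pvCumul (pvRuns d) (b + m) with hL
        have hshape : L = (b + m) :: L.tail := cumul_shape (pvRuns d) (b + m)
        have hz : (b :: L).zip ((b :: L).tail) = (b, b + m) :: L.zip L.tail := by
          rw [List.tail_cons]
          conv_lhs => rw [hshape]
          rw [List.zip_cons_cons, ← hshape]
        rw [hz, PySem.List.enumerate_cons, List.map_cons]
        have hdsub : ∀ x ∈ d, x ∈ c :: rest := by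
          intro x hx
          exact List.mem_cons_of_mem _ ((List.dropWhile_sublist _).subset hx)
        have hdlen : d.length < n := by
          have h1 := List.length_dropWhile_le ((· == c) : Char → Bool) rest
          simp only [List.length_cons] at hlen
          rw [← hdq] at h1
          omega
        have hks := hsign c (by simp)
        have htail : (PySem.List.enumerate (L.zip L.tail) (k + 1)).map
            (fun kp => (kp.2.2 - kp.2.1) * te * (if kp.1 % 2 == 0 then first else -first)) =
            (pvRuns d).map (pvEmitB te) := by
          apply ih d.length hdlen d rfl (fun x hx => hb x (hdsub x hx)) (k + 1) (b + m)
          intro c' hc'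
          have hdc : d.head? = some c' := hc'
          have hc'c : c' ≠ c := by
            have h2 := List.head?_dropWhile_not (· == c) rest
            rw [← hdq, hdc] at h2
            simpa using h2
          have hc'bit : pvIsBit c' := hb c' (hdsub c' (List.mem_of_mem_head? hc'))
          have hsv : pvSignVal c' = -pvSignVal c := by
            rcases hc with h1 | h1 <;> rcases hc'bit with h2 | h2 <;>
              simp [h1, h2, pvSignVal] at hc'c ⊢
          rw [hsv, ← hks]
          rcases Int.emod_two_eq k with h | h
          · have h1 : (k + 1) % 2 = 1 := by omega
            simp [h, h1]
          · have h1 : (k + 1) % 2 = 0 := by omega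
            simp [h, h1]
        rw [htail, List.map_cons]
        congr 1
        dsimp only
        rw [hks, show b + m - b = m from by ring]
        rcases hc with h1 | h1 <;> subst h1 <;>
          simp [pvEmitB, pvSignVal, hm] <;> ring

-- B's core on an already-built nonempty bit string equals the run-length grouping
lemma alt_core (te : Int) (bits : List Char) (hne : bits ≠ []) (hb : ∀ c ∈ bits, pvIsBit c)
    (cuts : List Int)
    (hcuts : cuts = (0 :: (PySem.List.pyRange 1 (bits.length : Int) 1).filter
        (fun i => !(PySem.List.pyGet? bits i == PySem.List.pyGet? bits (i - 1)))) ++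
        [(bits.length : Int)]) :
    (PySem.List.enumerate (cuts.zip (PySem.List.slice cuts (some 1) none))).map
      (fun kp => (kp.2.2 - kp.2.1) * te *
        (if kp.1 % 2 == 0 then (if PySem.List.pyGet? bits 0 == some '1' then (1:Int) else -1)
         else -(if PySem.List.pyGet? bits 0 == some '1' then (1:Int) else -1))) =
      (pvRuns bits).map (pvEmitB te) := by
  match bits, hne with
  | c :: rest, _ =>
    have hfilt := filter_range_eq_bcuts (c :: rest) 0
    simp only [Nat.cast_zero, zero_add, List.drop_zero] at hfilt
    have hcc : cuts = pvCumul (pvRuns (c :: rest)) 0 := by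
      rw [hcuts, hfilt]
      have h2 := cuts_eq_cumul (c :: rest).length (c :: rest) rfl (by simp) 0
      simp only [zero_add] at h2
      rw [List.cons_append]
      exact h2
    have hF : (if PySem.List.pyGet? (c :: rest) 0 == some '1' then (1 : Int) else -1) =
        pvSignVal c := by
      rw [PySem.List.pyGet?_zero_cons]
      by_cases h : c = '1' <;> simp [pvSignVal, h]
    rw [hcc, PySem.List.slice_from_one]
    simp only [hF]
    exact enum_zip_cumul te (pvSignVal c) (c :: rest).length (c :: rest) rfl hb 0 0
      (by intro x hx; simp at hx; subst hx; simp)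

-- ===== VERDICT (by name: the statement is the Claim_ definition above) =====
theorem convert_binraw_to_timings_spec : Claim_equal_convert_binraw_to_timings := by
  intro hex_data te bit_count _hdom hpre
  unfold Spec_convert_binraw_to_timings convert_binraw_to_timings convert_binraw_to_timings_alt
  dsimp only
  rw [bits_eq]
  have hb := trunc_bits _ bit_count (bits0_bits hex_data hpre)
  set bits := pvTrunc ((hex_data.map (fun h => pvFormat8 (pvHexVal h))).flatten) bit_count with hbits
  by_cases hne : bits = []
  · simp [hne]
  · rw [if_neg (by simpa [List.isEmpty_iff] using hne)]
    rw [main_eq te bits hb]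
    exact (alt_core te bits hne hb _ rfl).symm
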